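-- pv_equiv track=rewrite | github.com/Charlarthebar/ShortList.ai-archive | Charlie's Work/update_nationwide_jobs.py | estimate_salary
-- ===== SOURCE A (Python) =====
-- SALARY_ESTIMATES = {
--     "software engineer": (120000, 180000), "software developer": (110000, 170000),
--     "senior software": (150000, 220000), "data scientist": (130000, 190000),
--     "data analyst": (75000, 110000), "data engineer": (130000, 180000),
--     "machine learning": (140000, 200000), "devops": (120000, 170000),
--     "frontend": (100000, 150000), "backend": (110000, 160000),
--     "full stack": (110000, 165000), "web developer": (80000, 120000),
--     "mobile developer": (110000, 160000), "qa engineer": (85000, 130000),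
--     "security engineer": (130000, 190000), "network engineer": (90000, 140000),
--     "systems administrator": (80000, 120000), "it support": (50000, 80000),
--     "product manager": (120000, 180000), "project manager": (90000, 140000),
--     "engineering manager": (160000, 230000), "operations manager": (80000, 130000),
--     "accountant": (65000, 95000), "financial analyst": (75000, 115000),
--     "business analyst": (85000, 130000), "consultant": (90000, 150000),
--     "sales representative": (50000, 90000), "account executive": (70000, 130000),
--     "marketing manager": (90000, 140000), "digital marketing": (60000, 100000),
--     "nurse": (75000, 110000), "registered nurse": (80000, 115000),
--     "physician": (200000, 350000), "pharmacist": (120000, 150000),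
--     "teacher": (50000, 80000), "professor": (100000, 180000),
--     "administrative assistant": (45000, 65000), "executive assistant": (60000, 90000),
--     "hr manager": (90000, 130000), "recruiter": (60000, 100000),
--     "lawyer": (130000, 220000), "paralegal": (55000, 80000),
--     "graphic designer": (55000, 85000), "ux designer": (90000, 140000),
--     "customer service": (40000, 60000), "customer success": (60000, 100000),
--     "warehouse": (35000, 50000), "driver": (40000, 60000), "delivery": (35000, 55000),
--     "intern": (40000, 60000), "entry level": (45000, 65000), "junior": (55000, 80000),
--     "senior": (90000, 140000), "lead": (100000, 160000), "director": (140000, 220000),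
-- }
--
-- def estimate_salary(title):
--     title_lower = title.lower()
--     best_match = None
--     best_len = 0
--     for keyword, salary in SALARY_ESTIMATES.items():
--         if keyword in title_lower and len(keyword) > best_len:
--             best_match = salary
--             best_len = len(keyword)
--     return best_match or (50000, 80000)
-- ===== SOURCE B (Python) =====
-- # The salary table kept as compact pipe-separated row strings, parsed once
-- # at import and stably sorted by descending keyword length, so the first
-- # substring hit in the title is exactly the longest (earliest) match.
-- _TABLE = [
--     "software engineer|120000|180000",
--     "software developer|110000|170000",
--     "senior software|150000|220000",
--     "data scientist|130000|190000",
--     "data analyst|75000|110000",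
--     "data engineer|130000|180000",
--     "machine learning|140000|200000",
--     "devops|120000|170000",
--     "frontend|100000|150000",
--     "backend|110000|160000",
--     "full stack|110000|165000",
--     "web developer|80000|120000",
--     "mobile developer|110000|160000",
--     "qa engineer|85000|130000",
--     "security engineer|130000|190000",
--     "network engineer|90000|140000",
--     "systems administrator|80000|120000",
--     "it support|50000|80000",
--     "product manager|120000|180000",
--     "project manager|90000|140000",
--     "engineering manager|160000|230000",
--     "operations manager|80000|130000",
--     "accountant|65000|95000",
--     "financial analyst|75000|115000",
--     "business analyst|85000|130000",
--     "consultant|90000|150000",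
--     "sales representative|50000|90000",
--     "account executive|70000|130000",
--     "marketing manager|90000|140000",
--     "digital marketing|60000|100000",
--     "nurse|75000|110000",
--     "registered nurse|80000|115000",
--     "physician|200000|350000",
--     "pharmacist|120000|150000",
--     "teacher|50000|80000",
--     "professor|100000|180000",
--     "administrative assistant|45000|65000",
--     "executive assistant|60000|90000",
--     "hr manager|90000|130000",
--     "recruiter|60000|100000",
--     "lawyer|130000|220000",
--     "paralegal|55000|80000",
--     "graphic designer|55000|85000",
--     "ux designer|90000|140000",
--     "customer service|40000|60000",
--     "customer success|60000|100000",
--     "warehouse|35000|50000",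
--     "driver|40000|60000",
--     "delivery|35000|55000",
--     "intern|40000|60000",
--     "entry level|45000|65000",
--     "junior|55000|80000",
--     "senior|90000|140000",
--     "lead|100000|160000",
--     "director|140000|220000",
-- ]
--
-- def _parse_rows():
--     rows = []
--     for line in _TABLE:
--         kw, lo, hi = line.split("|")
--         rows.append((kw, (int(lo), int(hi))))
--     rows.sort(key=lambda r: -len(r[0]))  # stable: equal lengths keep table order
--     return rows
--
-- _SORTED_ROWS = _parse_rows()
--
-- def estimate_salary(title):
--     t = title.lower()
--     for kw, sal in _SORTED_ROWS:
--         if kw in t: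
--             return sal
--     return (50000, 80000)
-- ===== Notes on version B (the rewrite author's own statement) =====
-- stated objective: alternative
-- what changed: B stores the table as compact pipe-separated row strings parsed once at import, stably sorts the parsed rows by descending keyword length, and per call returns the salary of the first keyword that is a substring of the lowercased title (short-circuiting), instead of A's max-tracking scan over the whole dict.
import Mathlib
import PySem

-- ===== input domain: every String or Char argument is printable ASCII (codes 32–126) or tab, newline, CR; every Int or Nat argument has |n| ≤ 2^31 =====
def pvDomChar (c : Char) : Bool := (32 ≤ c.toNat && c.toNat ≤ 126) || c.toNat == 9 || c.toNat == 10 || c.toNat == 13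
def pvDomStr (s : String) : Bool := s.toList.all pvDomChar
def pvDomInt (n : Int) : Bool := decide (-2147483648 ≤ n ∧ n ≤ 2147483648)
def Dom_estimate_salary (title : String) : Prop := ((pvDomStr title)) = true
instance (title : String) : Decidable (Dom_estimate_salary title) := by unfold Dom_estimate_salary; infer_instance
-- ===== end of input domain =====

-- B keeps the table as a text block parsed once and stably sorted by descending keyword
-- length, then returns the first substring match (alternative decomposition of A's scan).

-- ===== PORT A =====
-- SALARY_ESTIMATES.items() in insertion order (the module-level dict literal)
def salaryTable : List (String × (Int × Int)) := [
  ("software engineer", ((120000 : Int), (180000 : Int))),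
  ("software developer", ((110000 : Int), (170000 : Int))),
  ("senior software", ((150000 : Int), (220000 : Int))),
  ("data scientist", ((130000 : Int), (190000 : Int))),
  ("data analyst", ((75000 : Int), (110000 : Int))),
  ("data engineer", ((130000 : Int), (180000 : Int))),
  ("machine learning", ((140000 : Int), (200000 : Int))),
  ("devops", ((120000 : Int), (170000 : Int))),
  ("frontend", ((100000 : Int), (150000 : Int))),
  ("backend", ((110000 : Int), (160000 : Int))),
  ("full stack", ((110000 : Int), (165000 : Int))),
  ("web developer", ((80000 : Int), (120000 : Int))),
  ("mobile developer", ((110000 : Int), (160000 : Int))),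
  ("qa engineer", ((85000 : Int), (130000 : Int))),
  ("security engineer", ((130000 : Int), (190000 : Int))),
  ("network engineer", ((90000 : Int), (140000 : Int))),
  ("systems administrator", ((80000 : Int), (120000 : Int))),
  ("it support", ((50000 : Int), (80000 : Int))),
  ("product manager", ((120000 : Int), (180000 : Int))),
  ("project manager", ((90000 : Int), (140000 : Int))),
  ("engineering manager", ((160000 : Int), (230000 : Int))),
  ("operations manager", ((80000 : Int), (130000 : Int))),
  ("accountant", ((65000 : Int), (95000 : Int))),
  ("financial analyst", ((75000 : Int), (115000 : Int))),
  ("business analyst", ((85000 : Int), (130000 : Int))),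
  ("consultant", ((90000 : Int), (150000 : Int))),
  ("sales representative", ((50000 : Int), (90000 : Int))),
  ("account executive", ((70000 : Int), (130000 : Int))),
  ("marketing manager", ((90000 : Int), (140000 : Int))),
  ("digital marketing", ((60000 : Int), (100000 : Int))),
  ("nurse", ((75000 : Int), (110000 : Int))),
  ("registered nurse", ((80000 : Int), (115000 : Int))),
  ("physician", ((200000 : Int), (350000 : Int))),
  ("pharmacist", ((120000 : Int), (150000 : Int))),
  ("teacher", ((50000 : Int), (80000 : Int))),
  ("professor", ((100000 : Int), (180000 : Int))),
  ("administrative assistant", ((45000 : Int), (65000 : Int))),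
  ("executive assistant", ((60000 : Int), (90000 : Int))),
  ("hr manager", ((90000 : Int), (130000 : Int))),
  ("recruiter", ((60000 : Int), (100000 : Int))),
  ("lawyer", ((130000 : Int), (220000 : Int))),
  ("paralegal", ((55000 : Int), (80000 : Int))),
  ("graphic designer", ((55000 : Int), (85000 : Int))),
  ("ux designer", ((90000 : Int), (140000 : Int))),
  ("customer service", ((40000 : Int), (60000 : Int))),
  ("customer success", ((60000 : Int), (100000 : Int))),
  ("warehouse", ((35000 : Int), (50000 : Int))),
  ("driver", ((40000 : Int), (60000 : Int))),
  ("delivery", ((35000 : Int), (55000 : Int))),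
  ("intern", ((40000 : Int), (60000 : Int))),
  ("entry level", ((45000 : Int), (65000 : Int))),
  ("junior", ((55000 : Int), (80000 : Int))),
  ("senior", ((90000 : Int), (140000 : Int))),
  ("lead", ((100000 : Int), (160000 : Int))),
  ("director", ((140000 : Int), (220000 : Int)))]

def estimate_salary (title : String) : Int × Int :=
  let title_lower := PySem.Str.lower title
  let st := salaryTable.foldl
    (fun (st : Option (Int × Int) × Int) kv =>
      if PySem.Str.isIn kv.1 title_lower && decide (st.2 < PySem.Str.len kv.1)
      then (some kv.2, PySem.Str.len kv.1) else st)
    (none, 0)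
  -- 'best_match or (50000, 80000)': best_match is None or a (truthy) pair
  st.1.getD (50000, 80000)

-- ===== PORT B =====
-- _TABLE: the pipe-separated row strings from Source B (keyword, low, high)
def tableRows : List String := [
  "software engineer|120000|180000",
  "software developer|110000|170000",
  "senior software|150000|220000",
  "data scientist|130000|190000",
  "data analyst|75000|110000",
  "data engineer|130000|180000",
  "machine learning|140000|200000",
  "devops|120000|170000",
  "frontend|100000|150000",
  "backend|110000|160000",
  "full stack|110000|165000",
  "web developer|80000|120000",
  "mobile developer|110000|160000",
  "qa engineer|85000|130000",
  "security engineer|130000|190000",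
  "network engineer|90000|140000",
  "systems administrator|80000|120000",
  "it support|50000|80000",
  "product manager|120000|180000",
  "project manager|90000|140000",
  "engineering manager|160000|230000",
  "operations manager|80000|130000",
  "accountant|65000|95000",
  "financial analyst|75000|115000",
  "business analyst|85000|130000",
  "consultant|90000|150000",
  "sales representative|50000|90000",
  "account executive|70000|130000",
  "marketing manager|90000|140000",
  "digital marketing|60000|100000",
  "nurse|75000|110000",
  "registered nurse|80000|115000",
  "physician|200000|350000",
  "pharmacist|120000|150000",
  "teacher|50000|80000",
  "professor|100000|180000",
  "administrative assistant|45000|65000",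
  "executive assistant|60000|90000",
  "hr manager|90000|130000",
  "recruiter|60000|100000",
  "lawyer|130000|220000",
  "paralegal|55000|80000",
  "graphic designer|55000|85000",
  "ux designer|90000|140000",
  "customer service|40000|60000",
  "customer success|60000|100000",
  "warehouse|35000|50000",
  "driver|40000|60000",
  "delivery|35000|55000",
  "intern|40000|60000",
  "entry level|45000|65000",
  "junior|55000|80000",
  "senior|90000|140000",
  "lead|100000|160000",
  "director|140000|220000"]

def parseRow (line : String) : String × (Int × Int) :=
  match PySem.Str.split? line "|" with
  | some [kw, lo, hi] => (kw, ((PySem.Int.ofStr? lo).getD 0, (PySem.Int.ofStr? hi).getD 0))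
  | _ => ("", (0, 0))

-- _SORTED_ROWS = _parse_rows(): parse each row, stable-sort by descending keyword length
def sortedRows : List (String × (Int × Int)) :=
  PySem.List.sorted (tableRows.map parseRow)
    (fun r => -(PySem.Str.len r.1))

def estimate_salary_alt (title : String) : Int × Int :=
  let t := PySem.Str.lower title
  match sortedRows.find? (fun r => PySem.Str.isIn r.1 t) with
  | some r => r.2
  | none => (50000, 80000)

-- ===== PRECONDITION & SPEC =====
def Spec_estimate_salary (title : String) (out : Int × Int) : Prop := out = estimate_salary_alt title
instance (title : String) (out : Int × Int) : Decidable (Spec_estimate_salary title out) := by unfold Spec_estimate_salary; infer_instance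

-- ===== CLAIM (what is proved, stated in full; the proofs are below) =====
def Claim_equal_estimate_salary : Prop := ∀ (title : String), Dom_estimate_salary title → Spec_estimate_salary title (estimate_salary title)

-- ===== LEMMAS AND PROOFS =====

-- A's loop body, named for the lemmas (definitionally the lambda in the port of A)
def stepA (m : String → Bool) (st : Option (Int × Int) × Int) (kv : String × (Int × Int)) :
    Option (Int × Int) × Int :=
  if m kv.1 && decide (st.2 < PySem.Str.len kv.1) then (some kv.2, PySem.Str.len kv.1) else st

-- goodLen L Ls: Ls enumerates L by rounds of non-increasing keyword length: each head x of Ls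
-- splits L as P ++ x :: Q with every element of P strictly shorter than x, every element of L
-- at most as long as x, len x > 0, and the rest of Ls enumerates P ++ Q.  This is the
-- m-independent bridge between A's argmax fold over L and B's first-match scan over Ls.
def goodLen : List (String × (Int × Int)) → List (String × (Int × Int)) → Bool
  | L, [] => L.isEmpty
  | L, x :: rest =>
    match L.dropWhile (fun y => decide (y ≠ x)) with
    | [] => false
    | _ :: Q =>
      let P := L.takeWhile (fun y => decide (y ≠ x))
      decide (0 < PySem.Str.len x.1)
      && P.all (fun y => decide (PySem.Str.len y.1 < PySem.Str.len x.1))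
      && L.all (fun y => decide (PySem.Str.len y.1 ≤ PySem.Str.len x.1))
      && goodLen (P ++ Q) rest

lemma head_dropWhile_false {a : Type} (p : a → Bool) :
    ∀ (L : List a) (z : a) (Q : List a), L.dropWhile p = z :: Q → p z = false := by
  intro L
  induction L with
  | nil => intro z Q h; simp [List.dropWhile] at h
  | cons x t ih =>
    intro z Q h
    by_cases hp : p x
    · rw [List.dropWhile_cons_of_pos hp] at h; exact ih z Q h
    · rw [List.dropWhile_cons_of_neg hp] at h
      cases h; simpa using hp

lemma snd_fold_lt (m : String → Bool) (P : List (String × (Int × Int))) :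
    ∀ (b : Option (Int × Int)) (n c : Int), n < c →
      (∀ y ∈ P, PySem.Str.len y.1 < c) → (P.foldl (stepA m) (b, n)).2 < c := by
  induction P with
  | nil => intro b n c hn _; simpa using hn
  | cons y t ih =>
    intro b n c hn hP
    simp only [List.foldl_cons]
    rcases hy : stepA m (b, n) y with ⟨b', n'⟩
    have hn' : n' < c := by
      unfold stepA at hy
      split at hy
      · cases hy; exact hP y (by simp)
      · cases hy; exact hn
    exact ih b' n' c hn' (fun z hz => hP z (by simp [hz]))

lemma fold_const (m : String → Bool) (Q : List (String × (Int × Int))) :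
    ∀ (b : Option (Int × Int)) (n : Int),
      (∀ y ∈ Q, PySem.Str.len y.1 ≤ n) → Q.foldl (stepA m) (b, n) = (b, n) := by
  induction Q with
  | nil => intro b n _; rfl
  | cons y t ih =>
    intro b n hQ
    have hdec : decide (n < PySem.Str.len y.1) = false :=
      decide_eq_false (not_lt.mpr (hQ y (by simp)))
    have hstep : stepA m (b, n) y = (b, n) := by
      unfold stepA; rw [hdec, Bool.and_false, if_neg (by simp)]
    simp only [List.foldl_cons, hstep]
    exact ih b n (fun z hz => hQ z (by simp [hz]))

lemma fold_eq_find (m : String → Bool) :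
    ∀ (Ls L : List (String × (Int × Int))), goodLen L Ls = true →
      (L.foldl (stepA m) (none, 0)).1 = (Ls.find? (fun kv => m kv.1)).map (·.2) := by
  intro Ls
  induction Ls with
  | nil =>
    intro L h
    have : L = [] := by simpa [goodLen, List.isEmpty_iff] using h
    simp [this]
  | cons x rest ih =>
    intro L h
    unfold goodLen at h
    rcases hd : L.dropWhile (fun y => decide (y ≠ x)) with _ | ⟨z, Q⟩
    · rw [hd] at h; simp at h
    · rw [hd] at h
      simp only [Bool.and_eq_true, List.all_eq_true, decide_eq_true_eq] at h
      obtain ⟨⟨⟨h0, hP⟩, hL⟩, hrec⟩ := h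
      have hz : z = x := by
        have := head_dropWhile_false (fun y => decide (y ≠ x)) L z Q hd
        simpa using this
      subst hz
      have hsplit : L = L.takeWhile (fun y => decide (y ≠ z)) ++ z :: Q := by
        conv_lhs => rw [← List.takeWhile_append_dropWhile (p := fun y => decide (y ≠ z)) (l := L)]
        rw [hd]
      by_cases hm : m z.1 = true
      · -- first match in Ls: A's fold over L also lands on z
        rcases hs : (L.takeWhile (fun y => decide (y ≠ z))).foldl (stepA m) (none, 0) with ⟨b', n'⟩
        have hn' : n' < PySem.Str.len z.1 := by
          have := snd_fold_lt m (L.takeWhile (fun y => decide (y ≠ z))) none 0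
            (PySem.Str.len z.1) h0 hP
          rw [hs] at this; exact this
        have hstep : stepA m (b', n') z = (some z.2, PySem.Str.len z.1) := by
          unfold stepA; rw [hm, decide_eq_true hn']; simp
        have hQle : ∀ y ∈ Q, PySem.Str.len y.1 ≤ PySem.Str.len z.1 := by
          intro y hy; exact hL y (by rw [hsplit]; simp [hy])
        calc (L.foldl (stepA m) (none, 0)).1
            = ((z :: Q).foldl (stepA m)
                ((L.takeWhile (fun y => decide (y ≠ z))).foldl (stepA m) (none, 0))).1 := by
              conv_lhs => rw [hsplit]
              rw [List.foldl_append]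
          _ = (Q.foldl (stepA m) (some z.2, PySem.Str.len z.1)).1 := by
              rw [hs]; simp only [List.foldl_cons, hstep]
          _ = some z.2 := by rw [fold_const m Q _ _ hQle]
          _ = (((z :: rest).find? (fun kv => m kv.1)).map (·.2)) := by
              simp [List.find?, hm]
      · -- z is a no-op for A's fold; drop it on both sides
        have hmf : m z.1 = false := by simpa using hm
        have hnoop : ∀ st, stepA m st z = st := by
          intro st; unfold stepA; rw [hmf, Bool.false_and, if_neg (by simp)]
        have hdrop : L.foldl (stepA m) (none, 0)
            = (L.takeWhile (fun y => decide (y ≠ z)) ++ Q).foldl (stepA m) (none, 0) := by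
          conv_lhs => rw [hsplit]
          rw [List.foldl_append, List.foldl_append, List.foldl_cons, hnoop]
        rw [hdrop, ih _ hrec]
        simp [List.find?, hmf]

set_option maxHeartbeats 4000000 in
set_option maxRecDepth 20000 in
lemma good_concrete : goodLen salaryTable sortedRows = true := by decide

-- ===== VERDICT (by name: the statement is the Claim_ definition above) =====
theorem estimate_salary_spec : Claim_equal_estimate_salary := by
  intro title _
  have h := fold_eq_find (fun k => PySem.Str.isIn k (PySem.Str.lower title))
    sortedRows salaryTable good_concrete
  show (salaryTable.foldl
      (stepA (fun k => PySem.Str.isIn k (PySem.Str.lower title))) (none, 0)).1.getD (50000, 80000)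
    = (match sortedRows.find? (fun kv => PySem.Str.isIn kv.1 (PySem.Str.lower title)) with
       | some kv => kv.2
       | none => (50000, 80000))
  rcases hf : sortedRows.find? (fun kv => PySem.Str.isIn kv.1 (PySem.Str.lower title)) with _ | kv
  · rw [hf] at h; simp only [Option.map_none] at h; rw [h, hf]; rfl
  · rw [hf] at h; simp only [Option.map_some] at h; rw [h, hf]; rfl
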